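-- pv_equiv track=rewrite | github.com/MrBrantCode/unitest_baseline | mut_generate/mist_train_taco/taco_7895/solution.py | calculate_probability_of_streak
-- ===== SOURCE A (Python) =====
-- def calculate_probability_of_streak(n, k):
--     def compute(mat, n, k):
--         for i in range(1, n + 1):
--             for j in range(k + 1):
--                 if j == 1:
--                     mat[i][j] = pow(2, i) - 1
--                     continue
--                 if i - j - 1 >= 0:
--                     mat[i][j] = 2 * mat[i - 1][j] + (pow(2, i - j - 1) - mat[i - j - 1][j])
--                 elif i - j == 0:
--                     mat[i][j] = 1
--
--     mat = [[0 for _ in range(k + 1)] for _ in range(n + 1)]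
--     compute(mat, n, k)
--     numerator = mat[n][k]
--     denominator = pow(2, n)
--
--     # Simplify the fraction
--     while (numerator & 0x1 == 0):
--         numerator >>= 1
--         denominator >>= 1
--
--     return (numerator, denominator)
-- ===== SOURCE B (Python) =====
-- def calculate_probability_of_streak(n, k):
--     # Only column k of the DP is ever needed: the recurrence for column k
--     # never reads any other column, so compute that single column in O(n).
--     col = [0] * (n + 1)
--     for i in range(k, n + 1):
--         col[i] = 1 if i == k else 2 * col[i - 1] + (1 << (i - k - 1)) - col[i - k - 1]
--     num = col[n]
--     den = 1 << n
--     # cancel the common power of two (den is a power of two, so stop when either is odd)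
--     while num % 2 == 0 and den % 2 == 0:
--         num //= 2
--         den //= 2
--     return (num, den)
-- ===== Notes on version B (the rewrite author's own statement) =====
-- stated objective: faster
-- what changed: B computes only column k of the DP table (the recurrence for column k never reads any other column), a single length-(n+1) column instead of A's (n+1)x(k+1) matrix fill, i.e. O(n) instead of O(n*k) bignum operations, and cancels the common power of two with a loop that also tests the denominator's parity so it always terminates.
-- intended difference: For k = 0 (with 1 <= n) A returns the pair (2^n-1, 2^n) - the probability of a streak of length >= 1, because its branch order never seeds mat[0][0] = 1 - while a streak of length 0 always occurs, so B returns the reduced fraction 1/1, the intended probability 1. — e.g. on calculate_probability_of_streak(1, 0): A returns (1, 2), B returns (1, 1)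
import Mathlib
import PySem

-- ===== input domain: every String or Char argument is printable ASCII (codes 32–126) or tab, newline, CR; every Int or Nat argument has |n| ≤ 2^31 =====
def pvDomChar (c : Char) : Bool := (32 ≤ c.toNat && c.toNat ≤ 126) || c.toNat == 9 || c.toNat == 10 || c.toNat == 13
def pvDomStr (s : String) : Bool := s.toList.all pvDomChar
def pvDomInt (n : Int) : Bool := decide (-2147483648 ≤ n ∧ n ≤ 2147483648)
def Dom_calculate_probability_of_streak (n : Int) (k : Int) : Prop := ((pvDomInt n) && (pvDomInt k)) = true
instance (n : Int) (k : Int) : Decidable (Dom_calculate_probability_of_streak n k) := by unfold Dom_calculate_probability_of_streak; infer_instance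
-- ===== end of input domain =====

-- B computes only column k of the DP table (that column's recurrence never reads any other
-- column): O(n) instead of O(n*k) bignum operations. Equal to A on 1 ≤ k ≤ n; at k = 0
-- (see D_ below) B returns the intended probability, the reduced fraction 1/1.

-- ===== PORT A =====
-- mat[i][j] read / write; exact on the non-negative in-range indices reached under Pre_
def pvGet2 (mat : List (List Int)) (i j : Int) : Int :=
  PySem.List.pyGetD (PySem.List.pyGetD mat i []) j 0

def pvSet2 (mat : List (List Int)) (i j : Int) (v : Int) : List (List Int) :=
  PySem.List.pySetD mat i (PySem.List.pySetD (PySem.List.pyGetD mat i []) j v)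

-- A's 'while numerator & 0x1 == 0: numerator >>= 1; denominator >>= 1' ('& 0x1 == 0' and '>> 1'
-- agree with '% 2 = 0' and '/ 2' on the non-negative values reached under Pre_). Fuel num.toNat
-- only makes the Lean function total: Python diverges exactly when num = 0, which Pre_ excludes;
-- for num > 0 the loop halves num each step, so num.toNat steps always suffice.
def pvStripGo : Nat → Int → Int → Int × Int
  | 0, num, den => (num, den)
  | fuel + 1, num, den => if num % 2 = 0 then pvStripGo fuel (num / 2) (den / 2) else (num, den)

def pvStrip (num den : Int) : Int × Int := pvStripGo num.toNat num den

-- body of 'compute' for one value of i (the inner 'for j in range(k + 1)' loop)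
def pvComputeStep (k : Int) (mat : List (List Int)) (i : Int) : List (List Int) :=
  (PySem.List.pyRange 0 (k + 1) 1).foldl (fun mat j =>
    if j = 1 then pvSet2 mat i j (2 ^ i.toNat - 1)
    else if 0 ≤ i - j - 1 then
      pvSet2 mat i j (2 * pvGet2 mat (i - 1) j + (2 ^ (i - j - 1).toNat - pvGet2 mat (i - j - 1) j))
    else if i - j = 0 then pvSet2 mat i j 1
    else mat) mat

def calculate_probability_of_streak (n : Int) (k : Int) : Int × Int :=
  let mat := (PySem.List.pyRange 0 (n + 1) 1).map
    (fun _ => (PySem.List.pyRange 0 (k + 1) 1).map (fun _ => (0 : Int)))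
  let mat := (PySem.List.pyRange 1 (n + 1) 1).foldl (pvComputeStep k) mat
  let numerator := pvGet2 mat n k
  let denominator := (2 : Int) ^ n.toNat   -- pow(2, n); exact for the n ≥ 0 admitted by Pre_
  pvStrip numerator denominator

-- ===== PORT B =====
-- col[i] = 1 if i == k else 2*col[i-1] + (1 << (i-k-1)) - col[i-k-1]
def pvColStep (k : Int) (col : List Int) (i : Int) : List Int :=
  PySem.List.pySetD col i
    (if i = k then 1
     else 2 * PySem.List.pyGetD col (i - 1) 0 + 2 ^ (i - k - 1).toNat
            - PySem.List.pyGetD col (i - k - 1) 0)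

-- B's 'while num % 2 == 0 and den % 2 == 0: num //= 2; den //= 2'. Fuel den.toNat only makes
-- the Lean function total: the loop halves den each step, so den.toNat steps always suffice
-- for den > 0 (den is 2^n here).
def pvStripGoB : Nat → Int → Int → Int × Int
  | 0, num, den => (num, den)
  | fuel + 1, num, den =>
    if num % 2 = 0 ∧ den % 2 = 0 then pvStripGoB fuel (num / 2) (den / 2) else (num, den)

def pvStripB (num den : Int) : Int × Int := pvStripGoB den.toNat num den

def calculate_probability_of_streak_alt (n : Int) (k : Int) : Int × Int :=
  let col := (PySem.List.pyRange k (n + 1) 1).foldl (pvColStep k) (List.replicate (n + 1).toNat 0)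
  let num := PySem.List.pyGetD col n 0
  pvStripB num ((2 : Int) ^ n.toNat)   -- den = 1 << n, then the reduction loop

-- ===== PRECONDITION & SPEC =====
-- Pre_: exactly where Python A returns normally. For n ≤ 0 or k < 0 A raises IndexError
-- (empty row list / empty rows); for k > n (with n ≥ 1) the numerator is 0 and A's
-- 'while numerator & 1 == 0' loop diverges.
def Pre_calculate_probability_of_streak (n : Int) (k : Int) : Prop := 1 ≤ n ∧ 0 ≤ k ∧ k ≤ n
instance (n : Int) (k : Int) : Decidable (Pre_calculate_probability_of_streak n k) := by
  unfold Pre_calculate_probability_of_streak; infer_instance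

def pvWitness_calculate_probability_of_streak : Int × Int := (2, 1)

-- For k = 0 (and 1 ≤ n) A returns (2^n - 1, 2^n) — the probability of a streak of length ≥ 1,
-- its branch order never seeds mat[0][0] = 1 — while a streak of length 0 always occurs,
-- so B returns the intended probability 1, as the reduced fraction 1/1.
def D_calculate_probability_of_streak (n : Int) (k : Int) : Prop := k = 0
instance (n : Int) (k : Int) : Decidable (D_calculate_probability_of_streak n k) := by
  unfold D_calculate_probability_of_streak; infer_instance

def Spec_calculate_probability_of_streak (n : Int) (k : Int) (out : Int × Int) : Prop :=
  ¬ D_calculate_probability_of_streak n k → out = calculate_probability_of_streak_alt n k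
instance (n : Int) (k : Int) (out : Int × Int) :
    Decidable (Spec_calculate_probability_of_streak n k out) := by
  unfold Spec_calculate_probability_of_streak; infer_instance

def pvDiffWitness_calculate_probability_of_streak : Int × Int := (1, 0)
def pvDiffWitnessOut_calculate_probability_of_streak : (Int × Int) × (Int × Int) := ((1, 2), (1, 1))

-- ===== CLAIM (what is proved, stated in full; the proofs are below) =====
def Claim_unchanged_calculate_probability_of_streak : Prop :=
  ∀ (n : Int) (k : Int), Dom_calculate_probability_of_streak n k →
    Pre_calculate_probability_of_streak n k →
    Spec_calculate_probability_of_streak n k (calculate_probability_of_streak n k)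
def Claim_changed_calculate_probability_of_streak : Prop :=
  Dom_calculate_probability_of_streak (pvDiffWitness_calculate_probability_of_streak.1) (pvDiffWitness_calculate_probability_of_streak.2) ∧
  Pre_calculate_probability_of_streak (pvDiffWitness_calculate_probability_of_streak.1) (pvDiffWitness_calculate_probability_of_streak.2) ∧
  D_calculate_probability_of_streak (pvDiffWitness_calculate_probability_of_streak.1) (pvDiffWitness_calculate_probability_of_streak.2) ∧
  calculate_probability_of_streak (pvDiffWitness_calculate_probability_of_streak.1) (pvDiffWitness_calculate_probability_of_streak.2) = pvDiffWitnessOut_calculate_probability_of_streak.1 ∧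
  calculate_probability_of_streak_alt (pvDiffWitness_calculate_probability_of_streak.1) (pvDiffWitness_calculate_probability_of_streak.2) = pvDiffWitnessOut_calculate_probability_of_streak.2 ∧
  pvDiffWitnessOut_calculate_probability_of_streak.1 ≠ pvDiffWitnessOut_calculate_probability_of_streak.2
def Claim_exact_calculate_probability_of_streak : Prop :=
  ∀ (n : Int) (k : Int), Dom_calculate_probability_of_streak n k →
    Pre_calculate_probability_of_streak n k →
    D_calculate_probability_of_streak n k →
    calculate_probability_of_streak n k ≠ calculate_probability_of_streak_alt n k

-- ===== LEMMAS AND PROOFS =====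

-- the value A's table holds at (i, j) once row i has been processed
def pvMa : Nat → Nat → Int
  | i, j =>
    if i = 0 then 0
    else if j = 1 then 2 ^ i - 1
    else if j + 1 ≤ i then
      2 * pvMa (i - 1) j + (2 ^ (i - j - 1) - pvMa (i - j - 1) j)
    else if i = j then 1
    else 0
termination_by i j => i
decreasing_by all_goals omega

-- the value B's column holds at i once position i has been written
def pvMb (k : Nat) : Nat → Int
  | i =>
    if i < k then 0
    else if i = k then 1
    else 2 * pvMb k (i - 1) + 2 ^ (i - k - 1) - pvMb k (i - k - 1)
termination_by i => i
decreasing_by all_goals omega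

theorem pvMb_one : ∀ i : Nat, pvMb 1 i = if i = 0 then 0 else 2 ^ i - 1 := by
  intro i
  induction i using Nat.strong_induction_on with
  | _ i ih =>
    rcases Nat.lt_or_ge i 3 with h | h
    · interval_cases i <;> simp [pvMb]
    · rw [pvMb]
      have h1 := ih (i - 1) (by omega)
      have h2 := ih (i - 1 - 1) (by omega)
      rw [if_neg (by omega)] at h1
      rw [if_neg (by omega)] at h2
      rw [if_neg (by omega), if_neg (by omega), h1, h2, if_neg (by omega)]
      have e1 : (2 : Int) ^ i = 2 * 2 ^ (i - 1) := by
        rw [← pow_succ']; congr 1; omega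
      have e2 : (2 : Int) ^ (i - 1) = 2 * 2 ^ (i - 1 - 1) := by
        rw [← pow_succ']; congr 1; omega
      linarith

theorem pvMa_eq_pvMb (k : Nat) (hk : 1 ≤ k) : ∀ i : Nat, pvMa i k = pvMb k i := by
  intro i
  induction i using Nat.strong_induction_on with
  | _ i ih =>
    rcases Nat.eq_or_lt_of_le hk with hk1 | hk2
    · subst hk1
      rw [pvMa, pvMb_one]
      rcases Nat.eq_zero_or_pos i with h0 | h0
      · simp [h0]
      · rw [if_neg (by omega), if_pos rfl, if_neg (by omega)]
    · rw [pvMa, pvMb]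
      rcases Nat.eq_zero_or_pos i with h0 | h0
      · rw [if_pos h0, if_pos (by omega)]
      rw [if_neg (by omega), if_neg (by omega)]
      by_cases hik : k + 1 ≤ i
      · rw [if_pos hik, if_neg (by omega), if_neg (by omega),
          ih (i - 1) (by omega), ih (i - k - 1) (by omega)]
        ring
      · by_cases hek : i = k
        · rw [if_pos hek]; simp [hek]
        · rw [if_neg hek, if_neg hik, if_pos (by omega)]

theorem pvMa_zero_col : ∀ i : Nat, pvMa i 0 = 2 ^ i - 1 := by
  intro i
  induction i using Nat.strong_induction_on with
  | _ i ih =>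
    rw [pvMa]
    rcases Nat.eq_zero_or_pos i with h0 | h0
    · simp [h0]
    · rw [if_neg (by omega), if_neg (by omega), if_pos (by omega),
        show i - 0 - 1 = i - 1 from by omega, ih (i - 1) (by omega)]
      have e1 : (2 : Int) ^ i = 2 * 2 ^ (i - 1) := by rw [← pow_succ']; congr 1; omega
      linarith

theorem pvMb_zero : ∀ i : Nat, pvMb 0 i = 2 ^ i := by
  intro i
  induction i using Nat.strong_induction_on with
  | _ i ih =>
    rw [pvMb]
    rcases Nat.eq_zero_or_pos i with h0 | h0
    · simp [h0]
    · rw [if_neg (by omega), if_neg (by omega), ih (i - 1) (by omega), ih (i - 0 - 1) (by omega)]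
      have e1 : (2 : Int) ^ i = 2 * 2 ^ (i - 1) := by rw [← pow_succ']; congr 1; omega
      have e2 : i - 0 - 1 = i - 1 := by omega
      rw [e2]; linarith

theorem pv_getD_set {α : Type} (l : List α) (i t : Nat) (v d : α) (hi : i < l.length) :
    (l.set i v).getD t d = if t = i then v else l.getD t d := by
  rcases eq_or_ne t i with rfl | hne
  · simp [List.getD_eq_getElem?_getD, List.getElem?_set, hi]
  · simp [List.getD_eq_getElem?_getD, List.getElem?_set, Ne.symm hne, hne]

theorem pv_getD_replicate {α : Type} (n t : Nat) (a d : α) :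
    (List.replicate n a).getD t d = if t < n then a else d := by
  simp only [List.getD_eq_getElem?_getD, List.getElem?_replicate]
  split_ifs <;> simp

def pvColAfter (K N m : Nat) : List Int :=
  (PySem.List.pyRange (K : Int) ((K : Int) + (m : Int)) 1).foldl (pvColStep (K : Int))
    (List.replicate (N + 1) 0)
def pvColInv (K N m : Nat) (col : List Int) : Prop :=
  col.length = N + 1 ∧
  ∀ t : Nat, t < N + 1 → col.getD t 0 = if t < K + m then pvMb K t else 0

theorem pvMb_below (K t : Nat) (h : t < K) : pvMb K t = 0 := by
  rw [pvMb, if_pos h]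

theorem pv_colFold (K N : Nat) : ∀ m : Nat, K + m ≤ N + 1 →
    pvColInv K N m (pvColAfter K N m) := by
  intro m
  induction m with
  | zero =>
    intro _
    unfold pvColAfter
    rw [show ((K : Int) + (0 : Nat)) = (K : Int) from by push_cast; ring,
      PySem.List.pyRange_one_eq_nil (le_refl _)]
    refine ⟨by simp, fun t ht => ?_⟩
    rw [List.foldl_nil, pv_getD_replicate, if_pos ht]
    split_ifs with h1
    · exact (pvMb_below K t h1).symm
    · rfl
  | succ m ih =>
    intro hm
    obtain ⟨ihlen, ihval⟩ := ih (by omega)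
    unfold pvColAfter at *
    rw [show ((K : Int) + ((m + 1 : Nat) : Int)) = ((K : Int) + (m : Nat)) + 1 from by push_cast; ring,
      PySem.List.pyRange_one_succ_right (by omega), List.foldl_append]
    simp only [List.foldl_cons, List.foldl_nil]
    set col := (PySem.List.pyRange (K : Int) ((K : Int) + (m : Int)) 1).foldl (pvColStep (K : Int))
      (List.replicate (N + 1) 0) with hcol
    rw [show ((K : Int) + (m : Int)) = ((K + m : Nat) : Int) from by push_cast; ring]
    unfold pvColStep
    rw [PySem.List.pySetD_natCast]
    refine ⟨by rw [List.length_set, ihlen], fun t ht => ?_⟩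
    rw [pv_getD_set _ _ _ _ _ (by rw [ihlen]; omega : K + m < col.length)]
    by_cases hsk : ((K + m : Nat) : Int) = (K : Int)
    · -- m = 0 : base cell col[K] = 1
      have hm0 : m = 0 := by omega
      subst hm0
      rw [if_pos hsk]
      by_cases het : t = K + 0
      · rw [if_pos het, if_pos (by omega), het, pvMb, if_neg (by omega), if_pos (by omega)]
      · rw [if_neg het, ihval t ht]
        by_cases hlt : t < K + 0
        · rw [if_pos hlt, if_pos (by omega)]
        · rw [if_neg hlt, if_neg (by omega)]
    · -- m ≥ 1 : recurrence cell col[K+m]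
      have hm1 : 1 ≤ m := by omega
      rw [if_neg hsk]
      have e1 : ((K + m : Nat) : Int) - 1 = ((K + m - 1 : Nat) : Int) := by push_cast [hm1]; omega
      have e2 : ((K + m : Nat) : Int) - (K : Int) - 1 = ((m - 1 : Nat) : Int) := by
        push_cast [hm1]; omega
      rw [e1, e2, PySem.List.pyGetD_natCast, PySem.List.pyGetD_natCast,
        show (((m - 1 : Nat) : Int)).toNat = m - 1 from by omega,
        ihval (K + m - 1) (by omega), ihval (m - 1) (by omega),
        if_pos (by omega : K + m - 1 < K + m), if_pos (by omega : m - 1 < K + m)]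
      by_cases het : t = K + m
      · subst het
        rw [if_pos rfl, if_pos (by omega)]
        conv_rhs => rw [pvMb]
        rw [if_neg (by omega), if_neg (by omega), show K + m - K - 1 = m - 1 from by omega]
      · rw [if_neg het, ihval t ht]
        by_cases hlt : t < K + m
        · rw [if_pos hlt, if_pos (by omega)]
        · rw [if_neg hlt, if_neg (by omega)]

theorem pv_B_val (N K : Nat) (hK : K ≤ N) :
    calculate_probability_of_streak_alt (N : Int) (K : Int) = pvStripB (pvMb K N) (2 ^ N) := by
  unfold calculate_probability_of_streak_alt
  have hb : ((N : Int) + 1) = (K : Int) + ((N + 1 - K : Nat) : Int) := by push_cast [hK]; omega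
  rw [show ((N : Int) + 1).toNat = N + 1 from by omega, hb]
  show pvStripB (PySem.List.pyGetD (pvColAfter K N (N + 1 - K)) (N : Int) 0)
      ((2 : Int) ^ ((N : Int)).toNat) = pvStripB (pvMb K N) (2 ^ N)
  obtain ⟨hlen, hval⟩ := pv_colFold K N (N + 1 - K) (by omega)
  rw [PySem.List.pyGetD_natCast, hval N (by omega), if_pos (by omega),
    show ((N : Int)).toNat = N from by omega]

def pvInner (i : Int) (mat : List (List Int)) (m : Int) : List (List Int) :=
  (PySem.List.pyRange 0 m 1).foldl (fun mat j =>
    if j = 1 then pvSet2 mat i j (2 ^ i.toNat - 1)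
    else if 0 ≤ i - j - 1 then
      pvSet2 mat i j (2 * pvGet2 mat (i - 1) j + (2 ^ (i - j - 1).toNat - pvGet2 mat (i - j - 1) j))
    else if i - j = 0 then pvSet2 mat i j 1
    else mat) mat
theorem pv_inner_eq (k : Int) (mat : List (List Int)) (i : Int) :
    pvComputeStep k mat i = pvInner i mat (k + 1) := rfl
def pvMatInv (K N I : Nat) (mat : List (List Int)) : Prop :=
  mat.length = N + 1 ∧
  (∀ r : Nat, r < N + 1 → (mat.getD r []).length = K + 1) ∧
  (∀ r : Nat, r < N + 1 → ∀ j : Nat, j < K + 1 →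
    (mat.getD r []).getD j 0 = if r < I then pvMa r j else 0)
def pvRowInv (K N I m : Nat) (mat : List (List Int)) : Prop :=
  mat.length = N + 1 ∧
  (∀ r : Nat, r < N + 1 → (mat.getD r []).length = K + 1) ∧
  (∀ r : Nat, r < N + 1 → ∀ j : Nat, j < K + 1 →
    (mat.getD r []).getD j 0 =
      if r < I then pvMa r j else if r = I ∧ j < m then pvMa I j else 0)

theorem pvSet2_eq (mat : List (List Int)) (r j : Nat) (v : Int) :
    pvSet2 mat (r : Int) (j : Int) v = mat.set r ((mat.getD r []).set j v) := by
  simp [pvSet2]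

theorem pvGet2_eq (mat : List (List Int)) (r j : Nat) :
    pvGet2 mat (r : Int) (j : Int) = (mat.getD r []).getD j 0 := by
  simp [pvGet2]

theorem pv_set_entry (K N I m : Nat) (mat' : List (List Int)) (hI : I < N + 1)
    (hm : m < K + 1) (inv : pvRowInv K N I m mat') (v : Int) (hv : v = pvMa I m) :
    pvRowInv K N I (m + 1) (mat'.set I ((mat'.getD I []).set m v)) := by
  obtain ⟨ilen, irow, ival⟩ := inv
  refine ⟨by rw [List.length_set, ilen], ?_, ?_⟩
  · intro r hr
    rw [pv_getD_set _ _ _ _ _ (by rw [ilen]; omega)]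
    by_cases hrI : r = I
    · rw [if_pos hrI, List.length_set, irow I hI]
    · rw [if_neg hrI, irow r hr]
  · intro r hr j hj
    rw [pv_getD_set _ _ _ _ _ (by rw [ilen]; omega)]
    by_cases hrI : r = I
    · subst hrI
      rw [if_pos rfl, pv_getD_set _ _ _ _ _ (by rw [irow r hr]; omega)]
      by_cases hjm : j = m
      · rw [if_pos hjm, if_neg (by omega), if_pos (by omega : r = r ∧ j < m + 1), hv, hjm]
      · rw [if_neg hjm, ival r hr j hj]
        by_cases h : r < r
        · omega
        · rw [if_neg h, if_neg h]
          by_cases h2 : j < m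
          · rw [if_pos (by omega : r = r ∧ j < m), if_pos (by omega : r = r ∧ j < m + 1)]
          · rw [if_neg (by simp; omega), if_neg (by simp; omega)]
    · rw [if_neg hrI, ival r hr j hj]
      by_cases h : r < I
      · rw [if_pos h, if_pos h]
      · rw [if_neg h, if_neg h, if_neg (by simp [hrI]), if_neg (by simp [hrI])]

theorem pv_skip_entry (K N I m : Nat) (mat' : List (List Int))
    (inv : pvRowInv K N I m mat') (hz : pvMa I m = 0) :
    pvRowInv K N I (m + 1) mat' := by
  obtain ⟨ilen, irow, ival⟩ := inv
  refine ⟨ilen, irow, fun r hr j hj => ?_⟩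
  rw [ival r hr j hj]
  by_cases h : r < I
  · rw [if_pos h, if_pos h]
  · rw [if_neg h, if_neg h]
    by_cases h2 : r = I ∧ j < m
    · rw [if_pos h2, if_pos ⟨h2.1, by omega⟩]
    · by_cases h3 : r = I ∧ j < m + 1
      · have hjm : j = m := by omega
        rw [if_neg h2, if_pos h3, hjm, hz]
      · rw [if_neg h2, if_neg h3]

theorem pv_rowFold (K N I : Nat) (hI1 : 1 ≤ I) (hIN : I ≤ N)
    (mat : List (List Int)) (hinv : pvMatInv K N I mat) :
    ∀ m : Nat, m ≤ K + 1 → pvRowInv K N I m (pvInner (I : Int) mat (m : Int)) := by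
  obtain ⟨hlen, hrow, hval⟩ := hinv
  intro m
  induction m with
  | zero =>
    intro _
    unfold pvInner
    rw [show ((0 : Nat) : Int) = (0 : Int) from rfl, PySem.List.pyRange_one_eq_nil (le_refl _),
      List.foldl_nil]
    refine ⟨hlen, hrow, fun r hr j hj => ?_⟩
    rw [hval r hr j hj]
    by_cases h : r < I
    · rw [if_pos h, if_pos h]
    · rw [if_neg h, if_neg h, if_neg (by omega)]
  | succ m ih =>
    intro hm
    have inv' := ih (by omega)
    unfold pvInner at inv' ⊢
    rw [show ((m + 1 : Nat) : Int) = ((m : Nat) : Int) + 1 from by push_cast; ring,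
      PySem.List.pyRange_one_succ_right (by omega), List.foldl_append]
    simp only [List.foldl_cons, List.foldl_nil]
    set mat' := (PySem.List.pyRange 0 ((m : Nat) : Int) 1).foldl (fun mat j =>
      if j = 1 then pvSet2 mat (I : Int) j (2 ^ ((I : Int)).toNat - 1)
      else if 0 ≤ (I : Int) - j - 1 then
        pvSet2 mat (I : Int) j (2 * pvGet2 mat ((I : Int) - 1) j +
          (2 ^ ((I : Int) - j - 1).toNat - pvGet2 mat ((I : Int) - j - 1) j))
      else if (I : Int) - j = 0 then pvSet2 mat (I : Int) j 1
      else mat) mat with hmat'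
    obtain ⟨ilen, irow, ival⟩ := inv'
    by_cases hm1 : ((m : Nat) : Int) = 1
    · -- j == 1 branch: writes 2^I - 1 = pvMa I 1
      have hm1' : m = 1 := by omega
      subst hm1'
      rw [if_pos hm1]
      have e : pvSet2 mat' (I : Int) ((1 : Nat) : Int) (2 ^ ((I : Int)).toNat - 1)
          = mat'.set I ((mat'.getD I []).set 1 (2 ^ ((I : Int)).toNat - 1)) :=
        pvSet2_eq mat' I 1 _
      rw [e]
      refine pv_set_entry K N I 1 mat' (by omega) (by omega) ⟨ilen, irow, ival⟩ _ ?_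
      rw [pvMa, if_neg (by omega), if_pos rfl, show ((I : Nat) : Int).toNat = I from by omega]
    · rw [if_neg hm1]
      by_cases hge : 0 ≤ (I : Int) - ((m : Nat) : Int) - 1
      · -- recurrence branch: m + 1 ≤ I
        rw [if_pos hge, pvSet2_eq,
          show (I : Int) - 1 = ((I - 1 : Nat) : Int) from by omega,
          show (I : Int) - ((m : Nat) : Int) - 1 = ((I - m - 1 : Nat) : Int) from by omega,
          pvGet2_eq, pvGet2_eq]
        refine pv_set_entry K N I m mat' (by omega) (by omega) ⟨ilen, irow, ival⟩ _ ?_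
        rw [ival (I - 1) (by omega) m (by omega), ival (I - m - 1) (by omega) m (by omega),
          if_pos (by omega : I - 1 < I), if_pos (by omega : I - m - 1 < I),
          show (((I - m - 1 : Nat) : Int)).toNat = I - m - 1 from by omega]
        conv_rhs => rw [pvMa]
        rw [if_neg (by omega), if_neg (by omega), if_pos (by omega)]
      · by_cases heq : (I : Int) - ((m : Nat) : Int) = 0
        · -- diagonal branch: I = m, writes 1
          rw [if_neg hge, if_pos heq, pvSet2_eq]
          refine pv_set_entry K N I m mat' (by omega) (by omega) ⟨ilen, irow, ival⟩ _ ?_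
          rw [pvMa, if_neg (by omega), if_neg (by omega), if_neg (by omega),
            if_pos (by omega)]
        · -- no write: I < m and pvMa I m = 0
          rw [if_neg hge, if_neg heq]
          refine pv_skip_entry K N I m mat' ⟨ilen, irow, ival⟩ ?_
          rw [pvMa, if_neg (by omega), if_neg (by omega), if_neg (by omega), if_neg (by omega)]

def pvMatAfter (K N I : Nat) : List (List Int) :=
  (PySem.List.pyRange 1 (I : Int) 1).foldl (pvComputeStep (K : Int))
    (List.replicate (N + 1) (List.replicate (K + 1) (0 : Int)))

theorem pvMa_row_zero (j : Nat) : pvMa 0 j = 0 := by rw [pvMa, if_pos rfl]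

theorem pv_matFold (K N : Nat) (hN : 1 ≤ N) :
    ∀ I : Nat, 1 ≤ I → I ≤ N + 1 → pvMatInv K N I (pvMatAfter K N I) := by
  intro I
  induction I with
  | zero => omega
  | succ i ih =>
    intro _ hIN
    rcases Nat.eq_zero_or_pos i with hi0 | hi0
    · -- I = 1 : nothing processed yet
      subst hi0
      unfold pvMatAfter
      rw [show ((0 + 1 : Nat) : Int) = (1 : Int) from by norm_num,
        PySem.List.pyRange_one_eq_nil (le_refl _), List.foldl_nil]
      refine ⟨by simp, ?_, ?_⟩
      · intro r hr
        rw [pv_getD_replicate, if_pos hr, List.length_replicate]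
      · intro r hr j hj
        rw [pv_getD_replicate, if_pos hr, pv_getD_replicate, if_pos hj]
        by_cases h : r < 0 + 1
        · rw [if_pos h, show r = 0 from by omega, pvMa_row_zero]
        · rw [if_neg h]
    · -- step: process row i
      have hinv := ih hi0 (by omega)
      unfold pvMatAfter at hinv ⊢
      rw [show ((i + 1 : Nat) : Int) = ((i : Nat) : Int) + 1 from by push_cast; ring,
        PySem.List.pyRange_one_succ_right (by omega), List.foldl_append]
      simp only [List.foldl_cons, List.foldl_nil]
      rw [pv_inner_eq, show ((K : Nat) : Int) + 1 = ((K + 1 : Nat) : Int) from by push_cast; ring]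
      have hrow := pv_rowFold K N i hi0 (by omega) _ hinv (K + 1) (le_refl _)
      obtain ⟨rlen, rrow, rval⟩ := hrow
      refine ⟨rlen, rrow, fun r hr j hj => ?_⟩
      rw [rval r hr j hj]
      by_cases h : r < i
      · rw [if_pos h, if_pos (by omega)]
      · rw [if_neg h]
        by_cases h2 : r = i
        · rw [if_pos ⟨h2, by omega⟩, if_pos (by omega), h2]
        · rw [if_neg (by simp [h2]), if_neg (by omega)]

theorem pv_A_val (N K : Nat) (hN : 1 ≤ N) (hK : K ≤ N) :
    calculate_probability_of_streak (N : Int) (K : Int) = pvStrip (pvMa N K) (2 ^ N) := by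
  unfold calculate_probability_of_streak
  have hmap : ∀ {α : Type} (b : Nat) (c : α),
      (PySem.List.pyRange 0 ((b : Nat) : Int) 1).map (fun _ => c) = List.replicate b c := by
    intro α b c
    rw [List.map_const', PySem.List.length_pyRange_one]
    norm_num
  rw [show ((N : Int) + 1) = ((N + 1 : Nat) : Int) from by push_cast; ring,
    show ((K : Int) + 1) = ((K + 1 : Nat) : Int) from by push_cast; ring,
    hmap (N + 1) _, hmap (K + 1) _]
  obtain ⟨mlen, mrow, mval⟩ := pv_matFold K N hN (N + 1) (by omega) (le_refl _)
  show pvStrip (pvGet2 (pvMatAfter K N (N + 1)) (N : Int) (K : Int))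
      ((2 : Int) ^ ((N : Int)).toNat) = pvStrip (pvMa N K) (2 ^ N)
  rw [pvGet2_eq, mval N (by omega) K (by omega), if_pos (by omega),
    show ((N : Int)).toNat = N from by omega]

theorem pv_strip_odd (num den : Int) (h : num % 2 = 1) : pvStrip num den = (num, den) := by
  unfold pvStrip
  cases hn : num.toNat with
  | zero => rw [pvStripGo]
  | succ f => rw [pvStripGo, if_neg (by omega)]

theorem pv_stripGoB_pow (f N : Nat) (hf : N < f) :
    pvStripGoB f (2 ^ N) (2 ^ N) = (1, 1) := by
  induction f generalizing N with
  | zero => omega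
  | succ f ih =>
    cases N with
    | zero => rw [pvStripGoB]; norm_num
    | succ n =>
      rw [pvStripGoB]
      have e : (2 : Int) ^ (n + 1) = 2 * 2 ^ n := by rw [pow_succ]; ring
      rw [if_pos ⟨by rw [e]; exact Int.mul_emod_right 2 _, by rw [e]; exact Int.mul_emod_right 2 _⟩,
        e, Int.mul_ediv_cancel_left _ (by norm_num)]
      exact ih n (by omega)

theorem pv_stripB_pow (N : Nat) : pvStripB ((2 : Int) ^ N) ((2 : Int) ^ N) = (1, 1) := by
  unfold pvStripB
  rw [show ((2 : Int) ^ N) = ((2 ^ N : Nat) : Int) from by push_cast; ring, Int.toNat_natCast,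
    show (((2 ^ N : Nat) : Int)) = (2 : Int) ^ N from by push_cast; ring]
  exact pv_stripGoB_pow _ N (Nat.lt_two_pow_self)

-- the complement 2^i - pvMb k i (sequences without a k-streak) is monotone, ≥ 1,
-- and ≤ 2^i - 1 once i ≥ k; hence 1 ≤ pvMb k i < 2^i there
theorem pvMb_bounds (k : Nat) (hk : 1 ≤ k) : ∀ i : Nat,
    (∀ j : Nat, j ≤ i → 2 ^ j - pvMb k j ≤ 2 ^ i - pvMb k i) ∧
    1 ≤ 2 ^ i - pvMb k i ∧ (k ≤ i → 1 ≤ pvMb k i) := by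
  intro i
  induction i using Nat.strong_induction_on with
  | _ i ih =>
    rcases Nat.lt_or_ge i k with hik | hik
    · -- i < k : pvMb k i = 0
      refine ⟨fun j hj => ?_, ?_, by omega⟩
      · rw [pvMb_below k i hik, pvMb_below k j (by omega)]
        have := pow_le_pow_right₀ (a := (2:Int)) (by norm_num : (1:Int) ≤ 2) hj
        linarith
      · rw [pvMb_below k i hik]
        have : (1 : Int) ≤ 2 ^ i := one_le_pow₀ (by norm_num)
        linarith
    · rcases Nat.eq_or_lt_of_le hik with hik1 | hik2
      · -- i = k : pvMb k k = 1
        have hmb : pvMb k i = 1 := by rw [pvMb, if_neg (by omega), if_pos (by omega)]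
        have hpow : (2 : Int) ^ i = 2 * 2 ^ (i - 1) := by rw [← pow_succ']; congr 1; omega
        refine ⟨fun j hj => ?_, ?_, fun _ => by rw [hmb]⟩
        · rcases Nat.eq_or_lt_of_le hj with rfl | hji
          · exact le_refl _
          · rw [hmb, pvMb_below k j (by omega)]
            have h1 : (2 : Int) ^ j ≤ 2 ^ (i - 1) :=
              pow_le_pow_right₀ (by norm_num : (1:Int) ≤ 2) (by omega)
            have h2 : (1 : Int) ≤ 2 ^ (i - 1) := one_le_pow₀ (by norm_num)
            linarith
        · rw [hmb]
          have h2 : (1 : Int) ≤ 2 ^ (i - 1) := one_le_pow₀ (by norm_num)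
          linarith
      · -- i > k : recurrence step
        have h1 := ih (i - 1) (by omega)
        have h2 := ih (i - k - 1) (by omega)
        have hmono := h1.1 (i - k - 1) (by omega)
        have hG1 := h1.2.1
        have hA1 := h1.2.2 (by omega)
        have hG2 := h2.2.1
        have hrec : pvMb k i = 2 * pvMb k (i - 1) + 2 ^ (i - k - 1) - pvMb k (i - k - 1) := by
          rw [pvMb, if_neg (by omega), if_neg (by omega)]
        have hpow : (2 : Int) ^ i = 2 * 2 ^ (i - 1) := by rw [← pow_succ']; congr 1; omega
        refine ⟨fun j hj => ?_, by linarith, fun _ => by linarith⟩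
        rcases Nat.eq_or_lt_of_le hj with rfl | hji
        · exact le_refl _
        · have := h1.1 j (by omega)
          linarith

theorem pv_goB_fuel : ∀ f g : Nat, ∀ num den : Int, 0 < num → num.toNat ≤ f → num.toNat ≤ g →
    pvStripGoB f num den = pvStripGoB g num den := by
  intro f
  induction f with
  | zero => intro g num den h hf _; omega
  | succ f ih =>
    intro g num den h hf hg
    cases g with
    | zero => omega
    | succ g =>
      rw [pvStripGoB, pvStripGoB]
      by_cases hc : num % 2 = 0 ∧ den % 2 = 0
      · rw [if_pos hc, if_pos hc]
        exact ih g (num / 2) (den / 2) (by omega) (by omega) (by omega)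
      · rw [if_neg hc, if_neg hc]

theorem pv_AB (f : Nat) : ∀ e : Nat, ∀ num : Int, 0 < num → num < 2 ^ e → num.toNat ≤ f →
    pvStripGo f num ((2 : Int) ^ e) = pvStripGoB f num ((2 : Int) ^ e) := by
  induction f with
  | zero => intro e num h _ hf; omega
  | succ f ih =>
    intro e num h hlt hf
    rw [pvStripGo, pvStripGoB]
    by_cases hc : num % 2 = 0
    · cases e with
      | zero => simp at hlt; omega
      | succ e =>
        have hp : (2 : Int) ^ (e + 1) = 2 * 2 ^ e := by rw [pow_succ]; ring
        rw [if_pos hc, if_pos ⟨hc, by rw [hp]; exact Int.mul_emod_right 2 _⟩, hp,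
          Int.mul_ediv_cancel_left _ (by norm_num)]
        exact ih e (num / 2) (by omega) (by omega : num / 2 < 2 ^ e) (by omega)
    · rw [if_neg hc, if_neg (by simp [hc])]

theorem pv_strip_eq (e : Nat) (num : Int) (h1 : 0 < num) (h2 : num < 2 ^ e) :
    pvStrip num ((2 : Int) ^ e) = pvStripB num ((2 : Int) ^ e) := by
  unfold pvStrip pvStripB
  rw [← pv_goB_fuel num.toNat (((2 : Int) ^ e).toNat) num ((2 : Int) ^ e) h1 (le_refl _)
    (by omega)]
  exact pv_AB num.toNat e num h1 h2 (le_refl _)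

-- ===== VERDICT (by name: the statement is the Claim_ definition above) =====
theorem calculate_probability_of_streak_spec : Claim_unchanged_calculate_probability_of_streak := by
  intro n k _ hpre
  unfold Spec_calculate_probability_of_streak
  intro hD
  unfold D_calculate_probability_of_streak at hD
  obtain ⟨hn, hk0, hkn⟩ := hpre
  have hn' : n = ((n.toNat : Nat) : Int) := by omega
  have hk' : k = ((k.toNat : Nat) : Int) := by omega
  rw [hn', hk', pv_A_val n.toNat k.toNat (by omega) (by omega),
    pv_B_val n.toNat k.toNat (by omega), pvMa_eq_pvMb k.toNat (by omega) n.toNat]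
  obtain ⟨-, hG, hpos⟩ := pvMb_bounds k.toNat (by omega) n.toNat
  exact pv_strip_eq n.toNat _ (by linarith [hpos (by omega : k.toNat ≤ n.toNat)])
    (by linarith)

theorem calculate_probability_of_streak_changed : Claim_changed_calculate_probability_of_streak := by
  unfold Claim_changed_calculate_probability_of_streak
  exact ⟨by decide, by decide, by decide, by decide, by decide, by decide⟩

theorem calculate_probability_of_streak_tight : Claim_exact_calculate_probability_of_streak := by
  intro n k _ hpre hD
  unfold D_calculate_probability_of_streak at hD
  subst hD
  obtain ⟨hn, -, -⟩ := hpre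
  have hn' : n = ((n.toNat : Nat) : Int) := by omega
  rw [hn', show (0 : Int) = ((0 : Nat) : Int) from rfl,
    pv_A_val n.toNat 0 (by omega) (by omega), pv_B_val n.toNat 0 (by omega),
    pvMa_zero_col, pvMb_zero]
  have h2 : (2 : Int) ^ n.toNat = 2 * 2 ^ (n.toNat - 1) := by
    rw [← pow_succ']; congr 1; omega
  rw [pv_strip_odd _ _ (by omega), pv_stripB_pow]
  intro h
  rw [Prod.ext_iff] at h
  have := h.2
  simp only at this
  omega
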